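-- pv_equiv track=rewrite | github.com/0003/AdventOfCode_2023 | 14/14b.py | can_stone_move
-- ===== SOURCE A (Python) =====
-- STONE = "O"
--
-- ROCK = "#"
--
-- SPACE  = "."
--
-- NORTH = (-1,0)
--
-- SOUTH = (1,0)
--
-- EAST = (0,1)
--
-- WEST = (0,-1)
--
-- def can_stone_move(platform,i,j,t):
--     if platform[i][j] in (ROCK,SPACE):
--         return False
--
--
--     #if north
--     if t == NORTH:
--         if i - 1 < 0:
--             return False
--         if i == 0 or platform[i-1][j] == ROCK:
--             result = False
--         elif platform[i-1][j] == STONE: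
--             result = True if can_stone_move(platform,i-1,j,NORTH) else False
--         elif platform[i-1][j] == SPACE:
--             result = True
--
--     #if south
--     if t == SOUTH:
--         if i + 1 >= len(platform):
--             return False
--         if i == len(platform) or platform[i+1][j] == ROCK:
--             result = False
--         elif platform[i+1][j] == STONE:
--             result = True if can_stone_move(platform,i+1,j,SOUTH) else False
--         elif platform[i+1][j] == SPACE:
--             result = True
--
--     #if east
--     if t == EAST:
--         if j + 1 >= len(platform):
--             return False
--         if j == len(platform[i]) or platform[i][j+1] == ROCK:
--             result = False
--         elif platform[i][j+1] == STONE: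
--             result = True if can_stone_move(platform,i,j+1,EAST) else False
--         elif platform[i][j+1] == SPACE:
--             result = True
--
--     #if west
--     if t == WEST:
--         if j - 1 < 0:
--             return False
--         if j == 0 or platform[i][j-1] == ROCK:
--             result = False
--         elif platform[i][j-1] == STONE:
--             result = True if can_stone_move(platform,i,j-1,WEST) else False
--         elif platform[i][j-1] == SPACE:
--             result = True
--
--     return result
-- ===== SOURCE B (Python) =====
-- STONE = "O"
--
-- ROCK = "#"
--
-- SPACE = "."
--
-- NORTH = (-1, 0)
--
-- SOUTH = (1, 0)
--
-- EAST = (0, 1)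
--
-- WEST = (0, -1)
--
--
-- def can_stone_move(platform, i, j, t):
--     # Iterative re-implementation: walk along the chain of stones instead of recursing.
--     if platform[i][j] in (ROCK, SPACE):
--         return False
--     while True:
--         if t == NORTH:
--             if i - 1 < 0:
--                 return False
--             ni, nj = i - 1, j
--         elif t == SOUTH:
--             if i + 1 >= len(platform):
--                 return False
--             ni, nj = i + 1, j
--         elif t == EAST:
--             if j + 1 >= len(platform):
--                 return False
--             ni, nj = i, j + 1
--         elif t == WEST:
--             if j - 1 < 0:
--                 return False
--             ni, nj = i, j - 1
--         else:
--             raise ValueError("unknown direction")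
--         cell = platform[ni][nj]
--         if cell == STONE:
--             i, j = ni, nj
--             continue
--         return cell == SPACE
-- ===== Notes on version B (the rewrite author's own statement) =====
-- stated objective: simpler
-- what changed: Replaces A's four copy-pasted recursive direction blocks by a single iterative while-loop that walks the chain of stones, keeping A's exact guard and per-direction bound tests (including EAST/WEST bounding by len(platform)).
-- outside the precondition, e.g. on can_stone_move([['X']], 0, 0, (-1, 0)): A returns False, B returns False; on can_stone_move([['O', '.']], 0, 0, (0, 1)): A returns False, B returns False
import Mathlib
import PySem

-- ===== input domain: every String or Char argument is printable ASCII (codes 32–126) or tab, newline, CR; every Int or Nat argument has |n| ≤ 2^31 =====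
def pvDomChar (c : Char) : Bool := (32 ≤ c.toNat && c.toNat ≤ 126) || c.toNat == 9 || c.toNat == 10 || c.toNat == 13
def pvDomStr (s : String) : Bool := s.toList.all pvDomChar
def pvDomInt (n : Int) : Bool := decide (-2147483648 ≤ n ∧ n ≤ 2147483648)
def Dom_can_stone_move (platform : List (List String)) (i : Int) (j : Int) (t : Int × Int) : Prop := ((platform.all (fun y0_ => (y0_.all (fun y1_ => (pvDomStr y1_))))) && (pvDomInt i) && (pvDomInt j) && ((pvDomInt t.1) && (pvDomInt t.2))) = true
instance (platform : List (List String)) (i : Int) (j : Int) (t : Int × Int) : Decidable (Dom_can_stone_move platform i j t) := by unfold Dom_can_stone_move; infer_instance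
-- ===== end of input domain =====

-- B replaces A's four copy-pasted recursive direction blocks by one iterative walk along
-- the chain of stones (same guard, same per-direction bound tests); objective: simpler.

-- shared primitive: platform[i][j] (Python indexing; none = IndexError)
def pvCell (platform : List (List String)) (i j : Int) : Option String :=
  (PySem.List.pyGet? platform i).bind (fun r => PySem.List.pyGet? r j)

-- termination measure for the chain walk / A's recursion (both move monotonically in one axis)
def pvMeasure (platform : List (List String)) (i j : Int) (t : Int × Int) : Nat :=
  if t = (-1, 0) then i.toNat
  else if t = (1, 0) then ((platform.length : Int) - i).toNat
  else if t = (0, 1) then ((platform.length : Int) - j).toNat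
  else if t = (0, -1) then j.toNat
  else 0

-- ===== PORT A =====
def can_stone_move (platform : List (List String)) (i : Int) (j : Int) (t : Int × Int) : Bool :=
  match PySem.List.pyGet? platform i with
  | none => false          -- platform[i] raises IndexError (outside Pre_)
  | some row =>
    match PySem.List.pyGet? row j with
    | none => false        -- platform[i][j] raises IndexError (outside Pre_)
    | some c =>
      if c = "#" ∨ c = "." then false
      else
        -- if north
        if hN : t = (-1, 0) then
          if h : i - 1 < 0 then false
          else
            match pvCell platform (i - 1) j with
            | none => false    -- IndexError (outside Pre_)
            | some c' =>
              if i = 0 ∨ c' = "#" then false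
              else if c' = "O" then can_stone_move platform (i - 1) j (-1, 0)
              else if c' = "." then true
              else false       -- 'result' unbound: UnboundLocalError (outside Pre_)
        -- if south
        else if hS : t = (1, 0) then
          if h : i + 1 ≥ (platform.length : Int) then false
          else
            match pvCell platform (i + 1) j with
            | none => false    -- IndexError (outside Pre_)
            | some c' =>
              if i = (platform.length : Int) ∨ c' = "#" then false
              else if c' = "O" then can_stone_move platform (i + 1) j (1, 0)
              else if c' = "." then true
              else false       -- UnboundLocalError (outside Pre_)
        -- if east (note: A bounds j by len(platform), kept literally)
        else if hE : t = (0, 1) then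
          if h : j + 1 ≥ (platform.length : Int) then false
          else
            match PySem.List.pyGet? row (j + 1) with
            | none => false    -- IndexError (outside Pre_)
            | some c' =>
              if j = (row.length : Int) ∨ c' = "#" then false
              else if c' = "O" then can_stone_move platform i (j + 1) (0, 1)
              else if c' = "." then true
              else false       -- UnboundLocalError (outside Pre_)
        -- if west
        else if hW : t = (0, -1) then
          if h : j - 1 < 0 then false
          else
            match PySem.List.pyGet? row (j - 1) with
            | none => false    -- IndexError (outside Pre_)
            | some c' =>
              if j = 0 ∨ c' = "#" then false
              else if c' = "O" then can_stone_move platform i (j - 1) (0, -1)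
              else if c' = "." then true
              else false       -- UnboundLocalError (outside Pre_)
        else false             -- 'result' never assigned: UnboundLocalError (outside Pre_)
termination_by pvMeasure platform i j t
decreasing_by
  · simp [pvMeasure, hN]; omega
  · simp [pvMeasure, hS]; omega
  · simp [pvMeasure, hE]; omega
  · simp [pvMeasure, hW]; omega

-- ===== PORT B =====
-- one step of the while-loop: bound test for t at (i,j), read the next cell,
-- stop on rock/space, advance through a stone
def pv_walk (platform : List (List String)) (i : Int) (j : Int) (t : Int × Int) : Bool :=
  if hN : t = (-1, 0) then
    if h : i - 1 < 0 then false
    else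
      match pvCell platform (i - 1) j with
      | none => false      -- IndexError in Python (outside Pre_)
      | some cell => if cell = "O" then pv_walk platform (i - 1) j t else decide (cell = ".")
  else if hS : t = (1, 0) then
    if h : i + 1 ≥ (platform.length : Int) then false
    else
      match pvCell platform (i + 1) j with
      | none => false      -- IndexError (outside Pre_)
      | some cell => if cell = "O" then pv_walk platform (i + 1) j t else decide (cell = ".")
  else if hE : t = (0, 1) then
    if h : j + 1 ≥ (platform.length : Int) then false   -- same bound as A
    else
      match pvCell platform i (j + 1) with
      | none => false      -- IndexError (outside Pre_)
      | some cell => if cell = "O" then pv_walk platform i (j + 1) t else decide (cell = ".")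
  else if hW : t = (0, -1) then
    if h : j - 1 < 0 then false
    else
      match pvCell platform i (j - 1) with
      | none => false      -- IndexError (outside Pre_)
      | some cell => if cell = "O" then pv_walk platform i (j - 1) t else decide (cell = ".")
  else false               -- Python B raises ValueError (outside Pre_)
termination_by pvMeasure platform i j t
decreasing_by
  · simp [pvMeasure, hN]; omega
  · simp [pvMeasure, hS]; omega
  · simp [pvMeasure, hE]; omega
  · simp [pvMeasure, hW]; omega

def can_stone_move_alt (platform : List (List String)) (i : Int) (j : Int) (t : Int × Int) : Bool :=
  match pvCell platform i j with
  | none => false          -- IndexError (outside Pre_)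
  | some c => if c = "#" ∨ c = "." then false else pv_walk platform i j t

-- ===== PRECONDITION & SPEC =====
-- Pre_ restricts to the puzzle's natural domain: either the start cell is rock/space (both
-- programs return False at the guard), or the grid is square over the alphabet {O,#,.}, the
-- start indices are valid Python indices and t is one of the four directions; outside this
-- A raises IndexError or UnboundLocalError on most inputs (cites list excluded inputs where A still returns).
def Pre_can_stone_move (platform : List (List String)) (i : Int) (j : Int) (t : Int × Int) : Prop :=
  pvCell platform i j = some "#" ∨ pvCell platform i j = some "." ∨
  ((∀ row ∈ platform, row.length = platform.length ∧ ∀ c ∈ row, c = "O" ∨ c = "#" ∨ c = ".") ∧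
   -(platform.length : Int) ≤ i ∧ i < (platform.length : Int) ∧
   -(platform.length : Int) ≤ j ∧ j < (platform.length : Int) ∧
   (t = (-1, 0) ∨ t = (1, 0) ∨ t = (0, 1) ∨ t = (0, -1)))
instance (platform : List (List String)) (i : Int) (j : Int) (t : Int × Int) : Decidable (Pre_can_stone_move platform i j t) := by unfold Pre_can_stone_move; infer_instance

def pvWitness_can_stone_move : List (List String) × Int × Int × (Int × Int) :=
  ([["O", "."], [".", "."]], 0, 0, (1, 0))

def Spec_can_stone_move (platform : List (List String)) (i : Int) (j : Int) (t : Int × Int) (out : Bool) : Prop := out = can_stone_move_alt platform i j t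
instance (platform : List (List String)) (i : Int) (j : Int) (t : Int × Int) (out : Bool) : Decidable (Spec_can_stone_move platform i j t out) := by unfold Spec_can_stone_move; infer_instance

-- ===== CLAIM (what is proved, stated in full; the proofs are below) =====
def Claim_equal_can_stone_move : Prop := ∀ (platform : List (List String)) (i : Int) (j : Int) (t : Int × Int), Dom_can_stone_move platform i j t → Pre_can_stone_move platform i j t → Spec_can_stone_move platform i j t (can_stone_move platform i j t)

-- ===== LEMMAS AND PROOFS =====

-- on a square grid over {O,#,.}, a valid index pair reads some alphabet cell
theorem pvCell_some (platform : List (List String)) (i j : Int)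
    (hsq : ∀ row ∈ platform, row.length = platform.length ∧ ∀ c ∈ row, c = "O" ∨ c = "#" ∨ c = ".")
    (hi1 : -(platform.length : Int) ≤ i) (hi2 : i < (platform.length : Int))
    (hj1 : -(platform.length : Int) ≤ j) (hj2 : j < (platform.length : Int)) :
    ∃ c, pvCell platform i j = some c ∧ (c = "O" ∨ c = "#" ∨ c = ".") := by
  have hrow : PySem.List.pyGet? platform i ≠ none := by
    intro hn
    rw [PySem.List.pyGet?_eq_none_iff] at hn
    simp [PySem.Raise.InRange] at hn; omega
  obtain ⟨row, hrow⟩ := Option.ne_none_iff_exists'.mp hrow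
  have hmem : row ∈ platform := PySem.List.mem_of_pyGet?_eq_some _ hrow
  obtain ⟨hlen, halpha⟩ := hsq row hmem
  have hc : PySem.List.pyGet? row j ≠ none := by
    intro hn
    rw [PySem.List.pyGet?_eq_none_iff] at hn
    simp [PySem.Raise.InRange, hlen] at hn; omega
  obtain ⟨c, hc⟩ := Option.ne_none_iff_exists'.mp hc
  exact ⟨c, by simp [pvCell, hrow, hc], halpha c (PySem.List.mem_of_pyGet?_eq_some _ hc)⟩

-- A's recursion equals B's iterative walk whenever the current cell is a stone
theorem pv_walk_eq (platform : List (List String)) (i j : Int) (t : Int × Int)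
    (hsq : ∀ row ∈ platform, row.length = platform.length ∧ ∀ c ∈ row, c = "O" ∨ c = "#" ∨ c = ".")
    (hi1 : -(platform.length : Int) ≤ i) (hi2 : i < (platform.length : Int))
    (hj1 : -(platform.length : Int) ≤ j) (hj2 : j < (platform.length : Int))
    (ht : t = (-1, 0) ∨ t = (1, 0) ∨ t = (0, 1) ∨ t = (0, -1))
    (hc : pvCell platform i j = some "O") :
    can_stone_move platform i j t = pv_walk platform i j t := by
  obtain ⟨row, hrow, hcj⟩ := Option.bind_eq_some_iff.mp hc
  have hmem : row ∈ platform := PySem.List.mem_of_pyGet?_eq_some _ hrow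
  have hlen : row.length = platform.length := (hsq row hmem).1
  rw [can_stone_move.eq_def, pv_walk.eq_def]
  simp only [hrow, hcj]
  rcases ht with ht | ht | ht | ht
  · -- NORTH
    by_cases hb : i - 1 < 0
    · simp [ht, hb]
    · obtain ⟨c', hc', halt⟩ := pvCell_some platform (i - 1) j hsq (by omega) (by omega) hj1 hj2
      rcases halt with h | h | h <;> subst h <;>
        simp [ht, hb, hc', show ¬ (i = 0) by omega]
      exact pv_walk_eq platform (i - 1) j (-1, 0) hsq (by omega) (by omega) hj1 hj2 (Or.inl rfl) hc'
  · -- SOUTH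
    by_cases hb : i + 1 ≥ (platform.length : Int)
    · simp [ht, hb]
    · obtain ⟨c', hc', halt⟩ := pvCell_some platform (i + 1) j hsq (by omega) (by omega) hj1 hj2
      rcases halt with h | h | h <;> subst h <;>
        simp [ht, hb, hc', show ¬ (i = (platform.length : Int)) by omega]
      exact pv_walk_eq platform (i + 1) j (1, 0) hsq (by omega) (by omega) hj1 hj2 (Or.inr (Or.inl rfl)) hc'
  · -- EAST
    by_cases hb : j + 1 ≥ (platform.length : Int)
    · simp [ht, hb]
    · obtain ⟨c', hc', halt⟩ := pvCell_some platform i (j + 1) hsq hi1 hi2 (by omega) (by omega)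
      have hc'' : PySem.List.pyGet? row (j + 1) = some c' := by
        have h2 := hc'
        simp only [pvCell, hrow, Option.bind_some] at h2
        exact h2
      rcases halt with h | h | h <;> subst h <;>
        simp [ht, hb, hc', hc'', show ¬ (j = (row.length : Int)) by omega]
      exact pv_walk_eq platform i (j + 1) (0, 1) hsq hi1 hi2 (by omega) (by omega) (Or.inr (Or.inr (Or.inl rfl))) hc'
  · -- WEST
    by_cases hb : j - 1 < 0
    · simp [ht, hb]
    · obtain ⟨c', hc', halt⟩ := pvCell_some platform i (j - 1) hsq hi1 hi2 (by omega) (by omega)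
      have hc'' : PySem.List.pyGet? row (j - 1) = some c' := by
        have h2 := hc'
        simp only [pvCell, hrow, Option.bind_some] at h2
        exact h2
      rcases halt with h | h | h <;> subst h <;>
        simp [ht, hb, hc', hc'', show ¬ (j = 0) by omega]
      exact pv_walk_eq platform i (j - 1) (0, -1) hsq hi1 hi2 (by omega) (by omega) (Or.inr (Or.inr (Or.inr rfl))) hc'
termination_by pvMeasure platform i j t
decreasing_by
  all_goals simp [pvMeasure, ht]; omega

-- ===== VERDICT (by name: the statement is the Claim_ definition above) =====
theorem can_stone_move_spec : Claim_equal_can_stone_move := by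
  intro platform i j t _ hpre
  unfold Spec_can_stone_move
  rcases hpre with h | h | ⟨hsq, hi1, hi2, hj1, hj2, ht⟩
  · obtain ⟨row, hrow, hcj⟩ := Option.bind_eq_some_iff.mp h
    rw [can_stone_move.eq_def]
    simp only [hrow, hcj]
    simp [can_stone_move_alt, h]
  · obtain ⟨row, hrow, hcj⟩ := Option.bind_eq_some_iff.mp h
    rw [can_stone_move.eq_def]
    simp only [hrow, hcj]
    simp [can_stone_move_alt, h]
  · obtain ⟨c, hc, halt⟩ := pvCell_some platform i j hsq hi1 hi2 hj1 hj2
    rcases halt with h | h | h <;> subst h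
    · rw [pv_walk_eq platform i j t hsq hi1 hi2 hj1 hj2 ht hc]
      simp [can_stone_move_alt, hc]
    · obtain ⟨row, hrow, hcj⟩ := Option.bind_eq_some_iff.mp hc
      rw [can_stone_move.eq_def]
      simp only [hrow, hcj]
      simp [can_stone_move_alt, hc]
    · obtain ⟨row, hrow, hcj⟩ := Option.bind_eq_some_iff.mp hc
      rw [can_stone_move.eq_def]
      simp only [hrow, hcj]
      simp [can_stone_move_alt, hc]
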